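-- pv_equiv track=rewrite | github.com/dobermanch/leetcode | src/python/problems/min_flips_test.py | Solution
-- ===== SOURCE A (Python) =====
-- def Solution(a: int, b: int, c: int) -> int:
--     result = 0
--     for i in range(32):
--         ar = (1 << i) & a
--         br = (1 << i) & b
--         cr = (1 << i) & c
--
--         if (ar | br) == cr:
--             continue
--
--         if ar == 0 and br == 0:
--             result += 1
--             continue
--
--         if ar > 0:
--             result += 1
--
--         if br > 0:
--             result += 1
--
--     return result
-- ===== SOURCE B (Python) =====
-- def Solution(a: int, b: int, c: int) -> int:
--     M = (1 << 32) - 1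
--     return (
--         bin(a & ~c & M).count("1")
--         + bin(b & ~c & M).count("1")
--         + bin(~(a | b) & c & M).count("1")
--     )
-- ===== Notes on version B (the rewrite author's own statement) =====
-- stated objective: idiomatic
-- what changed: Replaces the per-bit loop over range(32) (extracting and comparing one bit of a, b, c per iteration) with a closed-form sum of three whole-word popcounts of masked values: bits where a (resp. b) is set but c is not, plus bits where c is set but neither a nor b is.
import Mathlib
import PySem

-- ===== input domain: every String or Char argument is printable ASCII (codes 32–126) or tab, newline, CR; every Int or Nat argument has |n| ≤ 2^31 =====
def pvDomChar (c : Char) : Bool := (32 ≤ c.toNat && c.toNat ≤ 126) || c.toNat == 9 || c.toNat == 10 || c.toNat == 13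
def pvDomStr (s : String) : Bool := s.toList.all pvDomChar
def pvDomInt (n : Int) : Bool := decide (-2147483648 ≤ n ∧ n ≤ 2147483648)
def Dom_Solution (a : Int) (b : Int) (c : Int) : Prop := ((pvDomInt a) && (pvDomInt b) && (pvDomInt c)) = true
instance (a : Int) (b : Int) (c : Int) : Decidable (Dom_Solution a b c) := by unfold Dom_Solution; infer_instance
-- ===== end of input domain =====

-- B replaces A's 32-iteration per-bit loop by three whole-word popcounts of masked bit patterns (no per-index loop); objective: idiomatic.

-- ===== PORT A =====
-- literal transliteration of A's loop over range(32); Python's & | on ints = Int.land / Int.lor (exact, two's complement)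
def Solution (a : Int) (b : Int) (c : Int) : Int :=
  (PySem.List.pyRange 0 32 1).foldl (fun result i =>
    let ar := Int.land ((1 : Int) <<< i) a
    let br := Int.land ((1 : Int) <<< i) b
    let cr := Int.land ((1 : Int) <<< i) c
    if Int.lor ar br = cr then result
    else if ar = 0 ∧ br = 0 then result + 1
    else
      let result := if ar > 0 then result + 1 else result
      if br > 0 then result + 1 else result) 0

-- ===== PORT B =====
-- bin(n).count('1') for a nonnegative Python int = number of 1 bits (exact: every argument below is masked, hence ≥ 0)
def popcountBin (n : Nat) : Nat :=
  if n = 0 then 0 else n % 2 + popcountBin (n / 2)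

def Solution_alt (a : Int) (b : Int) (c : Int) : Int :=
  let M : Int := ((1 : Int) <<< (32 : Int)) - 1
  (popcountBin (Int.land (Int.land a (Int.lnot c)) M).toNat : Int)
  + (popcountBin (Int.land (Int.land b (Int.lnot c)) M).toNat : Int)
  + (popcountBin (Int.land (Int.land (Int.lnot (Int.lor a b)) c) M).toNat : Int)

-- ===== PRECONDITION & SPEC =====
def Spec_Solution (a : Int) (b : Int) (c : Int) (out : Int) : Prop := out = Solution_alt a b c
instance (a : Int) (b : Int) (c : Int) (out : Int) : Decidable (Spec_Solution a b c out) := by unfold Spec_Solution; infer_instance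

-- ===== CLAIM (what is proved, stated in full; the proofs are below) =====
def Claim_equal_Solution : Prop := ∀ (a : Int) (b : Int) (c : Int), Dom_Solution a b c → Spec_Solution a b c (Solution a b c)

-- ===== LEMMAS AND PROOFS =====

-- (1 << i) & a  =  2^i or 0 according to bit i of a (two's complement)
theorem land_one_shiftLeft (a : Int) (i : Nat) :
    Int.land ((1 : Int) <<< (i : Int)) a
      = if a.testBit i then ((2 : Int) ^ i) else 0 := by
  rw [Int.one_shiftLeft]
  cases a with
  | ofNat n =>
    show ((2 ^ i &&& n : Nat) : Int) = _
    rw [Nat.two_pow_and]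
    simp only [Int.testBit]
    by_cases h : n.testBit i = true <;> simp [h]
  | negSucc m =>
    show ((Nat.ldiff (2 ^ i) m : Nat) : Int) = _
    have : Nat.ldiff (2 ^ i) m = if m.testBit i then 0 else 2 ^ i := by
      apply Nat.eq_of_testBit_eq
      intro j
      rw [Nat.testBit_ldiff]
      by_cases hij : i = j
      · subst hij; cases h : m.testBit i <;> simp [Nat.testBit_two_pow_self]
      · cases h : m.testBit i <;> simp [Nat.testBit_two_pow_of_ne hij]
    rw [this]
    simp only [Int.testBit]
    by_cases h : m.testBit i = true <;> simp [h]

theorem nat_ldiff_zero (m : Nat) : Nat.ldiff m 0 = m := by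
  apply Nat.eq_of_testBit_eq
  intro j
  simp [Nat.testBit_ldiff]

theorem int_zero_lor (x : Int) : Int.lor 0 x = x := by
  cases x with
  | ofNat n => show ((0 ||| n : Nat) : Int) = _; simp
  | negSucc m => show Int.negSucc (Nat.ldiff m 0) = _; rw [nat_ldiff_zero]

theorem int_lor_zero (x : Int) : Int.lor x 0 = x := by
  cases x with
  | ofNat n => show ((n ||| 0 : Nat) : Int) = _; simp
  | negSucc m => show Int.negSucc (Nat.ldiff m 0) = _; rw [nat_ldiff_zero]

theorem int_lor_self (x : Int) : Int.lor x x = x := by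
  cases x with
  | ofNat n => show ((n ||| n : Nat) : Int) = _; simp
  | negSucc m => show Int.negSucc (m &&& m) = _; rw [Nat.and_self]

-- what A's loop body adds at bit i, as a function of the three bits
def contribN (a b c : Int) (i : Nat) : Nat :=
  ((a.testBit i) && !(c.testBit i)).toNat + ((b.testBit i) && !(c.testBit i)).toNat
    + ((!(a.testBit i || b.testBit i)) && (c.testBit i)).toNat

theorem body_eq (a b c : Int) (r : Int) (i : Nat) :
    (fun result (i : Int) =>
      let ar := Int.land ((1 : Int) <<< i) a
      let br := Int.land ((1 : Int) <<< i) b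
      let cr := Int.land ((1 : Int) <<< i) c
      if Int.lor ar br = cr then result
      else if ar = 0 ∧ br = 0 then result + 1
      else
        let result := if ar > 0 then result + 1 else result
        if br > 0 then result + 1 else result) r (i : Int)
      = r + (contribN a b c i : Int) := by
  simp only [land_one_shiftLeft, contribN]
  have hpos : (0 : Int) < 2 ^ i := by positivity
  have hne : (2 : Int) ^ i ≠ 0 := ne_of_gt hpos
  cases ha : a.testBit i <;> cases hb : b.testBit i <;> cases hc : c.testBit i <;>
    simp [int_zero_lor, int_lor_zero, int_lor_self, hne, hne.symm, hpos] <;> omega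

theorem foldl_eq_sum (f : Int → Nat → Int) (g : Nat → Nat)
    (hf : ∀ r k, f r k = r + (g k : Int)) :
    ∀ (l : List Nat) (s : Int), List.foldl f s l = s + (((l.map g).sum : Nat) : Int) := by
  intro l
  induction l with
  | nil => intro s; simp
  | cons x xs ih =>
    intro s
    rw [List.foldl_cons, hf, ih, List.map_cons, List.sum_cons]
    push_cast
    ring

theorem lt_two_pow_of_high_bits_false (n k : Nat) (h : ∀ i, k ≤ i → n.testBit i = false) :
    n < 2 ^ k := by
  have hn : n = n % 2 ^ k := by
    apply Nat.eq_of_testBit_eq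
    intro j
    rw [Nat.testBit_mod_two_pow]
    by_cases hj : j < k
    · simp [hj]
    · simp [hj, h j (Nat.le_of_not_lt hj)]
  rw [hn]
  exact Nat.mod_lt _ (Nat.two_pow_pos k)

theorem toNat_land_mask_testBit (X : Int) (i : Nat) :
    (Int.land X (((2 : Nat) ^ 32 - 1 : Nat) : Int)).toNat.testBit i
      = (decide (i < 32) && X.testBit i) := by
  have hm : Nat.testBit 4294967295 i = decide (i < 32) := by
    rw [show (4294967295 : Nat) = 2 ^ 32 - 1 from rfl, Nat.testBit_two_pow_sub_one]
  cases X with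
  | ofNat n =>
    show ((n &&& (2 ^ 32 - 1) : Nat) : Int).toNat.testBit i = _
    simp [Nat.testBit_and, Int.testBit, hm, Bool.and_comm]
  | negSucc m =>
    show ((Nat.ldiff (2 ^ 32 - 1) m : Nat) : Int).toNat.testBit i = _
    simp [Nat.testBit_ldiff, Int.testBit, hm]

theorem toNat_land_mask_lt (X : Int) :
    (Int.land X (((2 : Nat) ^ 32 - 1 : Nat) : Int)).toNat < 2 ^ 32 := by
  apply lt_two_pow_of_high_bits_false
  intro i hi
  rw [toNat_land_mask_testBit]
  simp [Nat.not_lt.mpr hi]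

theorem popcountBin_step (n : Nat) : popcountBin n = n % 2 + popcountBin (n / 2) := by
  rw [popcountBin]
  by_cases h : n = 0
  · subst h; simp [popcountBin]
  · simp [h]

theorem popcountBin_eq_sum (k : Nat) : ∀ n : Nat, n < 2 ^ k →
    popcountBin n = (((List.range k).map (fun i => (n.testBit i).toNat)).sum) := by
  induction k with
  | zero => intro n hn; interval_cases n; simp [popcountBin]
  | succ k ih =>
    intro n hn
    rw [popcountBin_step, List.range_succ_eq_map]
    simp only [List.map_cons, List.map_map, List.sum_cons]
    have h2 : n / 2 < 2 ^ k := by rw [Nat.pow_succ] at hn; omega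
    rw [ih (n / 2) h2]
    congr 1
    · have h0 : n.testBit 0 = decide (n % 2 = 1) := Nat.testBit_zero n
      rw [h0]
      rcases Nat.mod_two_eq_zero_or_one n with h | h <;> simp [h]
    · congr 1
      apply List.map_congr_left
      intro i _
      simp [Nat.testBit_succ]

theorem sum_map_add3 {α : Type} (l : List α) (f g h : α → Nat) :
    ((l.map f).sum + (l.map g).sum + (l.map h).sum)
      = (l.map (fun i => f i + g i + h i)).sum := by
  induction l with
  | nil => simp
  | cons x xs ih => simp only [List.map_cons, List.sum_cons, ← ih]; ring

-- popcount of one masked word = per-bit sum of the word's bit pattern over the 32-bit window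
theorem popcount_masked (X : Int) :
    (popcountBin (Int.land X (((2 : Nat) ^ 32 - 1 : Nat) : Int)).toNat : Int)
      = (((List.range 32).map (fun i => (X.testBit i).toNat)).sum : Nat) := by
  rw [popcountBin_eq_sum 32 _ (toNat_land_mask_lt X)]
  congr 2
  apply List.map_congr_left
  intro i hi
  rw [toNat_land_mask_testBit]
  simp [List.mem_range.mp hi]

-- ===== VERDICT (by name: the statement is the Claim_ definition above) =====
theorem Solution_spec : Claim_equal_Solution := by
  intro a b c _
  unfold Spec_Solution
  have hM : ((1 : Int) <<< (32 : Int)) - 1 = (((2 : Nat) ^ 32 - 1 : Nat) : Int) := by decide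
  have hA : Solution a b c
      = (((List.range 32).map (contribN a b c)).sum : Nat) := by
    unfold Solution
    rw [PySem.List.pyRange_one, show ((32 : Int) - 0).toNat = 32 by decide]
    simp only [zero_add, List.foldl_map]
    refine Eq.trans (foldl_eq_sum _ (contribN a b c) ?_ (List.range 32) 0) (by rw [zero_add])
    intro r k
    exact body_eq a b c r k
  have hX1 : ∀ i : Nat, (Int.land a (Int.lnot c)).testBit i = ((a.testBit i) && !(c.testBit i)) := by
    intro i; rw [Int.testBit_land, Int.testBit_lnot]
  have hX2 : ∀ i : Nat, (Int.land b (Int.lnot c)).testBit i = ((b.testBit i) && !(c.testBit i)) := by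
    intro i; rw [Int.testBit_land, Int.testBit_lnot]
  have hX3 : ∀ i : Nat, (Int.land (Int.lnot (Int.lor a b)) c).testBit i
      = ((!(a.testBit i || b.testBit i)) && (c.testBit i)) := by
    intro i; rw [Int.testBit_land, Int.testBit_lnot, Int.testBit_lor]
  have hB : Solution_alt a b c
      = (((List.range 32).map (fun i => ((a.testBit i) && !(c.testBit i)).toNat)).sum : Nat)
        + (((List.range 32).map (fun i => ((b.testBit i) && !(c.testBit i)).toNat)).sum : Nat)
        + (((List.range 32).map (fun i => ((!(a.testBit i || b.testBit i)) && (c.testBit i)).toNat)).sum : Nat) := by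
    show (popcountBin (Int.land (Int.land a (Int.lnot c)) (((1:Int) <<< (32:Int)) - 1)).toNat : Int)
        + (popcountBin (Int.land (Int.land b (Int.lnot c)) (((1:Int) <<< (32:Int)) - 1)).toNat : Int)
        + (popcountBin (Int.land (Int.land (Int.lnot (Int.lor a b)) c) (((1:Int) <<< (32:Int)) - 1)).toNat : Int) = _
    rw [hM, popcount_masked, popcount_masked, popcount_masked]
    simp only [hX1, hX2, hX3]
  rw [hA, hB, ← Nat.cast_add, ← Nat.cast_add, sum_map_add3]
  rfl
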